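-- pv_equiv track=rewrite | github.com/miliar/Code_Jam_Webscraper | solutions_python/Problem_207/352.py | order_stalls_small
-- ===== SOURCE A (Python) =====
-- RED = 'R'
--
-- YELLOW = 'Y'
--
-- BLUE = 'B'
--
-- def order_stalls_small(N, R, Y, B):
--     colors = sorted([[R, RED], [Y, YELLOW], [B, BLUE]], reverse=True)
--     order = [''] * N
--     c = 0
--     for i in range(0, N, 2):
--         while colors[c][0] == 0:
--             c = (c + 1) % len(colors)
--         order[i] = colors[c][1]
--         colors[c][0] -= 1
--
--     for j in range(1, N, 2):
--         while colors[c][0] == 0: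
--             c = (c + 1) % len(colors)
--         order[j] = colors[c][1]
--         colors[c][0] -= 1
--
--     return ''.join(order)
-- ===== SOURCE B (Python) =====
-- RED = 'R'
--
-- YELLOW = 'Y'
--
-- BLUE = 'B'
--
-- def order_stalls_small(N, R, Y, B):
--     # Rank the three colours (count descending, letter descending on ties) by a
--     # decision tree of tuple comparisons, then compute each stall's letter
--     # independently by a closed-form index formula -- no mutable counters, no
--     # rotating pointer, no materialised colour sequence.
--     a, b, c = (R, RED), (Y, YELLOW), (B, BLUE)
--     if a >= b:
--         if b >= c:
--             f, s, t = a, b, c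
--         elif a >= c:
--             f, s, t = a, c, b
--         else:
--             f, s, t = c, a, b
--     else:
--         if a >= c:
--             f, s, t = b, a, c
--         elif b >= c:
--             f, s, t = b, c, a
--         else:
--             f, s, t = c, b, a
--     t1 = max(f[0], 0)
--     t2 = t1 + max(s[0], 0)
--     half = (N + 1) // 2
--     out = []
--     for p in range(N):
--         k = p // 2 if p % 2 == 0 else half + p // 2
--         out.append(f[1] if k < t1 else s[1] if k < t2 else t[1])
--     return ''.join(out)
-- ===== Notes on version B (the rewrite author's own statement) =====
-- stated objective: alternative
-- what changed: A simulates a rotating bucket pointer over three mutable counters, decrementing and scattering letters into even then odd stalls; B ranks the three colours once with a decision tree of tuple comparisons and computes each stall's letter independently from a closed-form index formula with threshold tests, with no mutable counters or materialised sequence.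
-- outside the precondition, e.g. on order_stalls_small(2, -1, -2, 0): A returns 'RR', B returns 'YY'
import Mathlib
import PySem

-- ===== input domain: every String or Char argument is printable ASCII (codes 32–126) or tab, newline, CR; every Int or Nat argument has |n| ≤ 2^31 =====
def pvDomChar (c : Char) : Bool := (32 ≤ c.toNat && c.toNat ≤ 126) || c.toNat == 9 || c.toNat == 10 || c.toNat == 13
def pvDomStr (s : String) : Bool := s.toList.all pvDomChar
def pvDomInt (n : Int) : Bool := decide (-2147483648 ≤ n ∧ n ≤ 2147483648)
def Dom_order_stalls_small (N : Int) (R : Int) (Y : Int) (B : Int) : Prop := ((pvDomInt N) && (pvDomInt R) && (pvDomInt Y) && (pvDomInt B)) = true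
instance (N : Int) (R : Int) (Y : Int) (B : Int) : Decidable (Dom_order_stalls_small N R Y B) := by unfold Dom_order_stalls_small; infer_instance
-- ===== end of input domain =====

-- B replaces A's rotating-bucket-pointer simulation by a decision-tree ranking of the
-- three colours plus a closed-form per-position index formula (alternative decomposition).


-- ===== PORT A =====
-- Python's sorted([[R,'R'],[Y,'Y'],[B,'B']], reverse=True) compares the two-element
-- lists lexicographically: count first, then the colour character ('B' < 'R' < 'Y').
-- colourKey encodes exactly that order in one Int key (ranks lie in [0,3), so
-- 4*count + rank is the same lexicographic comparison) — exact for this call.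
def colourKey (p : Int × String) : Int :=
  4 * p.1 + (if p.2 = "Y" then 2 else if p.2 = "R" then 1 else 0)

def sortedColours (R : Int) (Y : Int) (B : Int) : List (Int × String) :=
  PySem.List.sorted [(R, "R"), (Y, "Y"), (B, "B")] colourKey true

-- while colors[c][0] == 0: c = (c + 1) % len(colors)
-- (fuel = len(colors): a full cycle of zero buckets is exactly where the Python
--  while loop diverges, which Pre_ excludes)
def skipZeros (colors : List (Int × String)) : Nat → Int → Int
  | 0, c => c
  | f + 1, c =>
      if (PySem.List.pyGetD colors c (0, "")).1 == 0 then
        skipZeros colors f (PySem.Int.mod (c + 1) (colors.length : Int))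
      else c

-- the body shared by A's two for loops (state: colors, c, order)
def stepA (st : List (Int × String) × Int × List String) (i : Int) :
    List (Int × String) × Int × List String :=
  let c := skipZeros st.1 st.1.length st.2.1
  let p := PySem.List.pyGetD st.1 c (0, "")
  (st.1.set c.toNat (p.1 - 1, p.2), c, st.2.2.set i.toNat p.2)

def order_stalls_small (N : Int) (R : Int) (Y : Int) (B : Int) : String :=
  let colors := sortedColours R Y B
  let st1 := (PySem.List.pyRange 0 N 2).foldl stepA (colors, 0, List.replicate N.toNat "")
  let st2 := (PySem.List.pyRange 1 N 2).foldl stepA st1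
  PySem.Str.join "" st2.2.2

-- ===== PORT B =====
-- Python tuple comparison (count, letter) >= (count', letter'); the string
-- comparison is code-point lexicographic, exact as Lean's < on toList.
def pairGe (a b : Int × String) : Bool :=
  decide (b.1 < a.1 ∨ (a.1 = b.1 ∧ ¬ a.2.toList < b.2.toList))

-- the decision tree ranking the three colours descending by (count, letter)
def rank3 (a b c : Int × String) :
    (Int × String) × (Int × String) × (Int × String) :=
  if pairGe a b then
    if pairGe b c then (a, b, c)
    else if pairGe a c then (a, c, b)
    else (c, a, b)
  else
    if pairGe a c then (b, a, c)
    else if pairGe b c then (b, c, a)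
    else (c, b, a)

def order_stalls_small_alt (N : Int) (R : Int) (Y : Int) (B : Int) : String :=
  let r := rank3 (R, "R") (Y, "Y") (B, "B")
  let t1 := max r.1.1 0
  let t2 := t1 + max r.2.1.1 0
  let half := PySem.Int.floordiv (N + 1) 2
  let out := (PySem.List.pyRange 0 N 1).foldl (fun acc p =>
    let k := if PySem.Int.mod p 2 == 0 then PySem.Int.floordiv p 2
             else half + PySem.Int.floordiv p 2
    acc ++ [if k < t1 then r.1.2 else if k < t2 then r.2.1.2 else r.2.2.2]) []
  PySem.Str.join "" out

-- ===== PRECONDITION & SPEC =====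
-- Pre_ excludes the inputs where more than the positive colour counts are demanded
-- (0 < N and max(R,0)+max(Y,0)+max(B,0) < N): there A's bucket pointer either cycles
-- forever over zero counts (A diverges) or feeds endlessly on whichever negative count
-- it happens to reach; such inputs (negative counts, or fewer colours than stalls) lie
-- outside the problem's natural domain, and B's closed-form formula simply falls
-- through to the last-ranked colour there.
def Pre_order_stalls_small (N : Int) (R : Int) (Y : Int) (B : Int) : Prop :=
  N ≤ 0 ∨ N ≤ max R 0 + max Y 0 + max B 0
instance (N : Int) (R : Int) (Y : Int) (B : Int) : Decidable (Pre_order_stalls_small N R Y B) := by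
  unfold Pre_order_stalls_small; infer_instance

def pvWitness_order_stalls_small : Int × Int × Int × Int := (4, 2, 1, 1)

def Spec_order_stalls_small (N : Int) (R : Int) (Y : Int) (B : Int) (out : String) : Prop := out = order_stalls_small_alt N R Y B
instance (N : Int) (R : Int) (Y : Int) (B : Int) (out : String) : Decidable (Spec_order_stalls_small N R Y B out) := by unfold Spec_order_stalls_small; infer_instance

-- ===== CLAIM (what is proved, stated in full; the proofs are below) =====
def Claim_equal_order_stalls_small : Prop := ∀ (N : Int) (R : Int) (Y : Int) (B : Int), Dom_order_stalls_small N R Y B → Pre_order_stalls_small N R Y B → Spec_order_stalls_small N R Y B (order_stalls_small N R Y B)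

-- ===== LEMMAS AND PROOFS =====

-- the count of bucket j (0 past the end)
def cnt (colors : List (Int × String)) (j : Nat) : Int := (colors.getD j (0, "")).1

-- the colour sequence still to be consumed from bucket c onward
def streamFrom (colors : List (Int × String)) (c : Nat) : List String :=
  (colors.drop c).flatMap (fun p => List.replicate p.1.toNat p.2)

-- sequential assignment order[i] := next stream element
def writes : List String → List Int → List String → List String
  | o, [], _ => o
  | o, _ :: _, [] => o
  | o, i :: is, x :: s => writes (o.set i.toNat x) is s

-- A's loop invariant: pointer in range, emptied buckets before it, counts
-- nonnegative, counts non-increasing strictly after the pointer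
def InvA (colors : List (Int × String)) (c : Int) : Prop :=
  colors.length = 3 ∧ 0 ≤ c ∧ c < 3 ∧
  (1 ≤ c → cnt colors 0 = 0) ∧ (2 ≤ c → cnt colors 1 = 0) ∧
  (cnt colors 0 < 0 → cnt colors 1 ≤ cnt colors 0) ∧
  (cnt colors 1 < 0 → cnt colors 2 ≤ cnt colors 1) ∧
  (c = 0 → cnt colors 2 ≤ cnt colors 1)

-- skipZeros on a concrete 3-bucket list, by cases on which counts are zero
theorem skipZeros3_stay (p0 p1 p2 : Int × String) (c : Int) (f : Nat)
    (h : (PySem.List.pyGetD [p0, p1, p2] c (0, "")).1 ≠ 0) :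
    skipZeros [p0, p1, p2] (f + 1) c = c := by
  simp [skipZeros, h]

theorem pyGetD3_zero (p0 p1 p2 : Int × String) : PySem.List.pyGetD [p0, p1, p2] 0 (0, "") = p0 := by
  simp [pysem]

theorem pyGetD3_one (p0 p1 p2 : Int × String) : PySem.List.pyGetD [p0, p1, p2] 1 (0, "") = p1 := by
  simp [PySem.List.pyGetD]

theorem pyGetD3_two (p0 p1 p2 : Int × String) : PySem.List.pyGetD [p0, p1, p2] 2 (0, "") = p2 := by
  simp [PySem.List.pyGetD]

theorem mod13 : PySem.Int.mod (0 + 1) (3 : Int) = 1 := by decide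
theorem mod23 : PySem.Int.mod (1 + 1) (3 : Int) = 2 := by decide

theorem stepA_spec (colors : List (Int × String)) (c : Int) (order : List String) (i : Int)
    (h : InvA colors c) (hne : streamFrom colors c.toNat ≠ []) :
    ∃ colors' c', stepA (colors, c, order) i
        = (colors', c', order.set i.toNat ((streamFrom colors c.toNat).headD ""))
      ∧ InvA colors' c' ∧ streamFrom colors' c'.toNat = (streamFrom colors c.toNat).tail := by
  obtain ⟨hlen, hc0, hc3, hz0, hz1, hm0, hm1, hd⟩ := h
  rcases colors with _ | ⟨p0, _ | ⟨p1, _ | ⟨p2, _ | ⟨p3, t⟩⟩⟩⟩ <;> simp at hlen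
  simp only [cnt, List.getD_cons_zero, List.getD_cons_succ] at hz0 hz1 hm0 hm1 hd
  have hc : c = 0 ∨ c = 1 ∨ c = 2 := by omega
  rcases hc with rfl | rfl | rfl
  · -- c = 0
    by_cases h0 : p0.1 = 0
    · by_cases h1 : p1.1 = 0
      · exfalso
        have h2 : p2.1 ≤ 0 := by have := hd rfl; omega
        simp [streamFrom, h0, h1, Int.toNat_of_nonpos h2] at hne
      · by_cases hp1 : 0 < p1.1
        · -- consume bucket 1
          have hskip : skipZeros [p0, p1, p2] 3 0 = 1 := by
            show skipZeros [p0, p1, p2] (2 + 1) 0 = 1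
            rw [skipZeros]
            have hcast : ((0 + 1 + 1 + 1 : Nat) : Int) = 3 := by norm_num
            simp only [pyGetD3_zero, h0, beq_self_eq_true, if_true, List.length_cons,
              List.length_nil, hcast, mod13]
            exact skipZeros3_stay _ _ _ _ _ (by rw [pyGetD3_one]; exact h1)
          obtain ⟨n, hn⟩ : ∃ n, p1.1.toNat = n + 1 := ⟨p1.1.toNat - 1, by omega⟩
          refine ⟨[p0, (p1.1 - 1, p1.2), p2], 1, ?_, ?_, ?_⟩
          · simp only [stepA, List.length_cons, List.length_nil, hskip, pyGetD3_one]
            simp [streamFrom, h0, hn, List.replicate_succ]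
          · refine ⟨rfl, by omega, by omega, ?_, ?_, ?_, ?_, ?_⟩ <;>
              simp only [cnt, List.getD_cons_zero, List.getD_cons_succ]
            · intro; exact h0
            · omega
            · omega
            · omega
            · omega
          · have hn' : (p1.1 - 1).toNat = n := by omega
            simp [streamFrom, h0, hn, hn', List.replicate_succ]
        · -- p1.1 < 0: everything at or after the pointer is empty, impossible
          exfalso
          have h2 : p2.1 ≤ p1.1 := hm1 (by omega)
          simp [streamFrom, h0, Int.toNat_of_nonpos (by omega : p1.1 ≤ 0),
            Int.toNat_of_nonpos (by omega : p2.1 ≤ 0)] at hne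
    · by_cases hp0 : 0 < p0.1
      · -- consume bucket 0
        have hskip : skipZeros [p0, p1, p2] 3 0 = 0 :=
          skipZeros3_stay _ _ _ _ _ (by rw [pyGetD3_zero]; exact h0)
        obtain ⟨n, hn⟩ : ∃ n, p0.1.toNat = n + 1 := ⟨p0.1.toNat - 1, by omega⟩
        refine ⟨[(p0.1 - 1, p0.2), p1, p2], 0, ?_, ?_, ?_⟩
        · simp only [stepA, List.length_cons, List.length_nil, hskip, pyGetD3_zero]
          simp [streamFrom, hn, List.replicate_succ]
        · refine ⟨rfl, by omega, by omega, by omega, by omega, ?_, ?_, ?_⟩ <;>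
            simp only [cnt, List.getD_cons_zero, List.getD_cons_succ]
          · omega
          · exact hm1
          · intro; exact hd rfl
        · have hn' : (p0.1 - 1).toNat = n := by omega
          simp [streamFrom, hn, hn', List.replicate_succ]
      · -- p0.1 < 0: buckets are sorted, so all counts are negative, impossible
        exfalso
        have h1 : p1.1 ≤ p0.1 := hm0 (by omega)
        have h2 : p2.1 ≤ p1.1 := hm1 (by omega)
        simp [streamFrom, Int.toNat_of_nonpos (by omega : p0.1 ≤ 0),
          Int.toNat_of_nonpos (by omega : p1.1 ≤ 0),
          Int.toNat_of_nonpos (by omega : p2.1 ≤ 0)] at hne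
  · -- c = 1
    have h0 : p0.1 = 0 := hz0 (by omega)
    by_cases h1 : p1.1 = 0
    · by_cases hp2 : 0 < p2.1
      · -- consume bucket 2
        have hskip : skipZeros [p0, p1, p2] 3 1 = 2 := by
          show skipZeros [p0, p1, p2] (2 + 1) 1 = 2
          rw [skipZeros]
          have hcast : ((0 + 1 + 1 + 1 : Nat) : Int) = 3 := by norm_num
          simp only [pyGetD3_one, h1, beq_self_eq_true, if_true, List.length_cons,
            List.length_nil, hcast, mod23]
          exact skipZeros3_stay _ _ _ _ _ (by rw [pyGetD3_two]; omega)
        obtain ⟨n, hn⟩ : ∃ n, p2.1.toNat = n + 1 := ⟨p2.1.toNat - 1, by omega⟩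
        refine ⟨[p0, p1, (p2.1 - 1, p2.2)], 2, ?_, ?_, ?_⟩
        · simp only [stepA, List.length_cons, List.length_nil, hskip, pyGetD3_two]
          simp [streamFrom, h1, hn, List.replicate_succ]
        · refine ⟨rfl, by omega, by omega, ?_, ?_, ?_, ?_, ?_⟩ <;>
            simp only [cnt, List.getD_cons_zero, List.getD_cons_succ] <;> omega
        · have hn' : (p2.1 - 1).toNat = n := by omega
          simp [streamFrom, h1, hn, hn', List.replicate_succ]
      · exfalso
        simp [streamFrom, h1, Int.toNat_of_nonpos (by omega : p2.1 ≤ 0)] at hne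
    · by_cases hp1 : 0 < p1.1
      · -- consume bucket 1
        have hskip : skipZeros [p0, p1, p2] 3 1 = 1 :=
          skipZeros3_stay _ _ _ _ _ (by rw [pyGetD3_one]; exact h1)
        obtain ⟨n, hn⟩ : ∃ n, p1.1.toNat = n + 1 := ⟨p1.1.toNat - 1, by omega⟩
        refine ⟨[p0, (p1.1 - 1, p1.2), p2], 1, ?_, ?_, ?_⟩
        · simp only [stepA, List.length_cons, List.length_nil, hskip, pyGetD3_one]
          simp [streamFrom, hn, List.replicate_succ]
        · refine ⟨rfl, by omega, by omega, ?_, ?_, ?_, ?_, ?_⟩ <;>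
            simp only [cnt, List.getD_cons_zero, List.getD_cons_succ] <;> omega
        · have hn' : (p1.1 - 1).toNat = n := by omega
          simp [streamFrom, hn, hn', List.replicate_succ]
      · exfalso
        have h2 : p2.1 ≤ p1.1 := hm1 (by omega)
        simp [streamFrom, Int.toNat_of_nonpos (by omega : p1.1 ≤ 0),
          Int.toNat_of_nonpos (by omega : p2.1 ≤ 0)] at hne
  · -- c = 2
    have h0 : p0.1 = 0 := hz0 (by omega)
    have h1 : p1.1 = 0 := hz1 (by omega)
    by_cases hp2 : 0 < p2.1
    · -- consume bucket 2
      have hskip : skipZeros [p0, p1, p2] 3 2 = 2 :=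
        skipZeros3_stay _ _ _ _ _ (by rw [pyGetD3_two]; omega)
      obtain ⟨n, hn⟩ : ∃ n, p2.1.toNat = n + 1 := ⟨p2.1.toNat - 1, by omega⟩
      refine ⟨[p0, p1, (p2.1 - 1, p2.2)], 2, ?_, ?_, ?_⟩
      · simp only [stepA, List.length_cons, List.length_nil, hskip, pyGetD3_two]
        simp [streamFrom, hn, List.replicate_succ]
      · refine ⟨rfl, by omega, by omega, ?_, ?_, ?_, ?_, ?_⟩ <;>
          simp only [cnt, List.getD_cons_zero, List.getD_cons_succ] <;> omega
      · have hn' : (p2.1 - 1).toNat = n := by omega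
        simp [streamFrom, hn, hn', List.replicate_succ]
    · exfalso
      simp [streamFrom, Int.toNat_of_nonpos (by omega : p2.1 ≤ 0)] at hne

theorem foldl_stepA (is : List Int) : ∀ (colors : List (Int × String)) (c : Int) (order : List String),
    InvA colors c → is.length ≤ (streamFrom colors c.toNat).length →
    ∃ colors' c', is.foldl stepA (colors, c, order)
        = (colors', c', writes order is (streamFrom colors c.toNat))
      ∧ InvA colors' c'
      ∧ streamFrom colors' c'.toNat = (streamFrom colors c.toNat).drop is.length := by
  induction is with
  | nil => intro colors c order h _; exact ⟨colors, c, by simp [writes], h, by simp⟩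
  | cons i is ih =>
    intro colors c order h hlen
    have hne : streamFrom colors c.toNat ≠ [] := by
      intro hnil; rw [hnil] at hlen; simp at hlen
    obtain ⟨x, rest, hx⟩ : ∃ x rest, streamFrom colors c.toNat = x :: rest := by
      cases hs : streamFrom colors c.toNat with
      | nil => exact absurd hs hne
      | cons a b => exact ⟨a, b, rfl⟩
    obtain ⟨colors1, c1, heq, hinv1, hs1⟩ := stepA_spec colors c order i h hne
    rw [hx] at heq hs1 hlen
    simp only [List.headD_cons, List.tail_cons] at heq hs1
    obtain ⟨colors', c', heq', hinv', hs'⟩ :=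
      ih colors1 c1 (order.set i.toNat x) hinv1 (by rw [hs1]; simpa using hlen)
    refine ⟨colors', c', ?_, hinv', ?_⟩
    · rw [List.foldl_cons, hx]
      simp only [writes]
      rw [heq, heq', hs1]
    · rw [hs', hs1, hx]
      simp

theorem writes_append (is1 : List Int) : ∀ (is2 : List Int) (o s : List String),
    is1.length ≤ s.length →
    writes o (is1 ++ is2) s = writes (writes o is1 s) is2 (s.drop is1.length) := by
  induction is1 with
  | nil => intro is2 o s _; simp [writes]
  | cons i is1 ih =>
    intro is2 o s hlen
    cases s with
    | nil => simp at hlen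
    | cons x rest =>
      simp only [List.cons_append, writes, List.length_cons, List.drop_succ_cons]
      exact ih is2 (o.set i.toNat x) rest (by simpa using hlen)

theorem rank_bounds (p : Int × String) :
    0 ≤ colourKey p - 4 * p.1 ∧ colourKey p - 4 * p.1 ≤ 2 := by
  simp only [colourKey]; split_ifs <;> omega

theorem pyRange_empty_of_le (a N : Int) (h : N ≤ a) : PySem.List.pyRange a N 2 = [] := by
  rw [PySem.List.pyRange_of_pos _ _ (by norm_num : (0:Int) < 2)]
  simp [show ¬ a < N by omega]

-- decoded tuple comparisons on the three concrete colour pairs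
theorem pairGe_RY (R Y : Int) : pairGe (R, "R") (Y, "Y") = decide (Y < R) := by
  rw [pairGe, decide_eq_decide]
  constructor
  · rintro (h | ⟨_, h⟩)
    · exact h
    · exact absurd (by decide : ("R":String).toList < ("Y":String).toList) h
  · exact fun h => Or.inl h

theorem pairGe_YB (Y B : Int) : pairGe (Y, "Y") (B, "B") = decide (B ≤ Y) := by
  rw [pairGe, decide_eq_decide]
  constructor
  · rintro (h | ⟨h, _⟩) <;> omega
  · intro h
    rcases eq_or_lt_of_le h with h' | h'
    · exact Or.inr ⟨h'.symm, (by decide : ¬ ("Y":String).toList < ("B":String).toList)⟩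
    · exact Or.inl h'

theorem pairGe_RB (R B : Int) : pairGe (R, "R") (B, "B") = decide (B ≤ R) := by
  rw [pairGe, decide_eq_decide]
  constructor
  · rintro (h | ⟨h, _⟩) <;> omega
  · intro h
    rcases eq_or_lt_of_le h with h' | h'
    · exact Or.inr ⟨h'.symm, (by decide : ¬ ("R":String).toList < ("B":String).toList)⟩
    · exact Or.inl h'

theorem colourKey_R (x : Int) : colourKey (x, "R") = 4 * x + 1 := by
  simp [colourKey]
theorem colourKey_Y (x : Int) : colourKey (x, "Y") = 4 * x + 2 := by
  simp [colourKey]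
theorem colourKey_B (x : Int) : colourKey (x, "B") = 4 * x := by
  simp [colourKey]

-- the decision tree produces exactly the reverse-sorted list of A
theorem rank3_sorted (R Y B : Int) :
    sortedColours R Y B
      = [(rank3 (R, "R") (Y, "Y") (B, "B")).1,
         (rank3 (R, "R") (Y, "Y") (B, "B")).2.1,
         (rank3 (R, "R") (Y, "Y") (B, "B")).2.2] := by
  have pacb : List.Perm [(R,"R"), (B,"B"), (Y,"Y")] [(R,"R"), (Y,"Y"), (B,"B")] :=
    List.Perm.cons _ (List.Perm.swap _ _ [])
  have pbac : List.Perm [(Y,"Y"), (R,"R"), (B,"B")] [(R,"R"), (Y,"Y"), (B,"B")] :=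
    List.Perm.swap _ _ _
  have pcab : List.Perm [(B,"B"), (R,"R"), (Y,"Y")] [(R,"R"), (Y,"Y"), (B,"B")] :=
    List.Perm.trans (List.Perm.swap _ _ _) pacb
  have pbca : List.Perm [(Y,"Y"), (B,"B"), (R,"R")] [(R,"R"), (Y,"Y"), (B,"B")] :=
    List.Perm.trans (List.Perm.cons _ (List.Perm.swap _ _ [])) pbac
  have pcba : List.Perm [(B,"B"), (Y,"Y"), (R,"R")] [(R,"R"), (Y,"Y"), (B,"B")] :=
    List.Perm.trans (List.Perm.swap _ _ _) pbca
  unfold sortedColours rank3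
  simp only [pairGe_RY, pairGe_YB, pairGe_RB, decide_eq_true_eq]
  split_ifs with h1 h2 h3 h4 h5 <;>
    refine PySem.List.sorted_rev_eq_of_perm_of_pairwise_gt _ _ _ ?_ ?_
  · exact List.Perm.refl _
  · simp [List.pairwise_cons, colourKey_R, colourKey_Y, colourKey_B]
    try omega
  · exact pacb
  · simp [List.pairwise_cons, colourKey_R, colourKey_Y, colourKey_B]
    try omega
  · exact pcab
  · simp [List.pairwise_cons, colourKey_R, colourKey_Y, colourKey_B]
    try omega
  · exact pbac
  · simp [List.pairwise_cons, colourKey_R, colourKey_Y, colourKey_B]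
    try omega
  · exact pbca
  · simp [List.pairwise_cons, colourKey_R, colourKey_Y, colourKey_B]
    try omega
  · exact pcba
  · simp [List.pairwise_cons, colourKey_R, colourKey_Y, colourKey_B]
    try omega

theorem length_writes (is : List Int) : ∀ (o s : List String), (writes o is s).length = o.length := by
  induction is with
  | nil => intro o s; simp [writes]
  | cons i is ih =>
    intro o s
    cases s with
    | nil => simp [writes]
    | cons x rest => simp [writes, ih]

theorem writes_getElem?_not_mem (is : List Int) : ∀ (o s : List String) (j : Nat),
    (∀ v ∈ is, v.toNat ≠ j) → (writes o is s)[j]? = o[j]? := by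
  induction is with
  | nil => intro o s j _; simp [writes]
  | cons i is ih =>
    intro o s j hnm
    cases s with
    | nil => simp [writes]
    | cons x rest =>
      simp only [writes]
      rw [ih _ _ _ (fun v hv => hnm v (List.mem_cons_of_mem _ hv))]
      exact List.getElem?_set_ne (hnm i List.mem_cons_self)

theorem writes_getElem? (is : List Int) : ∀ (o s : List String) (r j : Nat) (v : Int),
    is[r]? = some v → v.toNat = j → j < o.length → r < s.length →
    (∀ r' v', r < r' → is[r']? = some v' → v'.toNat ≠ j) →
    (writes o is s)[j]? = s[r]? := by
  induction is with
  | nil => intro o s r j v hr; simp at hr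
  | cons i is ih =>
    intro o s r j v hr hv hj hrs hlater
    cases s with
    | nil => simp at hrs
    | cons x rest =>
      simp only [writes]
      cases r with
      | zero =>
        simp only [List.getElem?_cons_zero, Option.some.injEq] at hr
        subst hr
        rw [writes_getElem?_not_mem]
        · rw [hv, List.getElem?_set_self (by omega), List.getElem?_cons_zero]
        · intro w hw
          obtain ⟨k, hk, hkw⟩ := List.getElem_of_mem hw
          exact hlater (k + 1) w (by omega) (by simp [List.getElem?_eq_getElem hk, hkw])
      | succ r =>
        simp only [List.getElem?_cons_succ] at hr
        rw [List.getElem?_cons_succ]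
        exact ih _ _ r j v hr hv (by simpa using hj) (by simpa using hrs)
          (fun r' v' h1 h2 => hlater (r' + 1) v' (by omega) (by simpa using h2))

theorem foldl_push (g : Int → String) (l : List Int) : ∀ (acc : List String),
    l.foldl (fun a p => a ++ [g p]) acc = acc ++ l.map g := by
  induction l with
  | nil => intro acc; simp
  | cons p l ih => intro acc; simp [ih]

theorem stream3_getElem? (f s t : Int × String) (r : Nat)
    (hr : r < f.1.toNat + s.1.toNat + t.1.toNat) :
    (streamFrom [f, s, t] 0)[r]?
      = some (if r < f.1.toNat then f.2
              else if r < f.1.toNat + s.1.toNat then s.2 else t.2) := by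
  simp only [streamFrom, List.drop_zero, List.flatMap_cons, List.flatMap_nil, List.append_nil]
  by_cases h1 : r < f.1.toNat
  · rw [List.getElem?_append_left (by simpa using h1)]
    simp [h1]
  · rw [List.getElem?_append_right (by simpa using h1)]
    simp only [List.length_replicate]
    by_cases h2 : r < f.1.toNat + s.1.toNat
    · rw [List.getElem?_append_left (by simp [List.length_replicate]; omega)]
      simp only [List.getElem?_replicate]
      simp only [h1, if_false, h2, if_true]
      simp [show r - f.1.toNat < s.1.toNat by omega]
    · rw [List.getElem?_append_right (by simp [List.length_replicate]; omega)]
      simp only [List.length_replicate, List.getElem?_replicate]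
      simp only [h1, if_false, h2, if_false]
      simp [show r - f.1.toNat - s.1.toNat < t.1.toNat by omega]

theorem pyRange_two_getElem? (a b : Int) (r : Nat) (h : a < b) :
    (PySem.List.pyRange a b 2)[r]?
      = if r < ((b - a + 1) / 2).toNat then some (a + 2 * r) else none := by
  rw [PySem.List.pyRange_of_pos _ _ (by norm_num : (0:Int) < 2)]
  simp only [h, if_true, List.getElem?_map]
  by_cases hr : r < ((b - a + 1) / 2).toNat
  · simp [show b - a + 2 - 1 = b - a + 1 by ring, hr]
  · simp [show b - a + 2 - 1 = b - a + 1 by ring, hr]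

theorem order_stalls_small_spec : Claim_equal_order_stalls_small := by
  intro N R Y B _ hpre
  simp only [Spec_order_stalls_small, order_stalls_small, order_stalls_small_alt]
  by_cases hN : N ≤ 0
  · rw [pyRange_empty_of_le _ _ hN, pyRange_empty_of_le _ _ (by omega),
      PySem.List.pyRange_one_eq_nil hN]
    simp [Int.toNat_of_nonpos hN]
  · have hNpos : (0:Int) < N := by omega
    have hsum : N ≤ max R 0 + max Y 0 + max B 0 := hpre.resolve_left hN
    have hsort := rank3_sorted R Y B
    set f := (rank3 (R, "R") (Y, "Y") (B, "B")).1 with hf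
    set s := (rank3 (R, "R") (Y, "Y") (B, "B")).2.1 with hs
    set t := (rank3 (R, "R") (Y, "Y") (B, "B")).2.2 with ht
    have hpw : List.Pairwise (fun a b => colourKey b ≤ colourKey a) [f, s, t] := by
      rw [← hsort]; exact PySem.List.sorted_pairwise_rev _ _
    have hdesc1 : s.1 ≤ f.1 := by
      have h1 := (List.pairwise_cons.1 hpw).1 s (by simp)
      have := rank_bounds f; have := rank_bounds s; omega
    have hdesc2 : t.1 ≤ s.1 := by
      have h1 := (List.pairwise_cons.1 (List.pairwise_cons.1 hpw).2).1 t (by simp)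
      have := rank_bounds s; have := rank_bounds t; omega
    have hperm : List.Perm [f, s, t] [(R, "R"), (Y, "Y"), (B, "B")] := by
      rw [← hsort]; exact PySem.List.sorted_perm _ _ _
    have hsumeq : f.1.toNat + s.1.toNat + t.1.toNat = R.toNat + Y.toNat + B.toNat := by
      have h := (hperm.map (fun p => p.1.toNat)).sum_eq
      simp at h; omega
    lift N to ℕ using (by omega : (0:Int) ≤ N) with n
    have hn0 : 0 < n := by exact_mod_cast hNpos
    have hntot : n ≤ f.1.toNat + s.1.toNat + t.1.toNat := by omega
    have hSlen : (streamFrom [f, s, t] 0).length = f.1.toNat + s.1.toNat + t.1.toNat := by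
      simp [streamFrom]; omega
    have hInv0 : InvA [f, s, t] 0 :=
      ⟨rfl, le_refl _, by norm_num, fun h => absurd h (by norm_num),
       fun h => absurd h (by norm_num),
       fun _ => by simpa [cnt] using hdesc1, fun _ => by simpa [cnt] using hdesc2,
       fun _ => by simpa [cnt] using hdesc2⟩
    have hev : (PySem.List.pyRange 0 (n:Int) 2).length = (n + 1) / 2 := by
      rw [PySem.List.pyRange_of_pos _ _ (by norm_num : (0:Int) < 2)]
      simp only [hNpos, if_true, List.length_map, List.length_range]
      omega
    have hodlen : (PySem.List.pyRange 1 (n:Int) 2).length = n / 2 := by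
      by_cases h1 : (1:Int) < (n:Int)
      · rw [PySem.List.pyRange_of_pos _ _ (by norm_num : (0:Int) < 2)]
        simp only [h1, if_true, List.length_map, List.length_range]
        omega
      · rw [pyRange_empty_of_le _ _ (by omega)]
        have : n = 1 := by omega
        simp [this]
    simp only [Int.toNat_natCast]
    rw [hsort]
    obtain ⟨col1, c1, heq1, hinv1, hs1⟩ :=
      foldl_stepA (PySem.List.pyRange 0 (n:Int) 2) [f, s, t] 0 (List.replicate n "") hInv0
        (by simp only [Int.toNat_zero]; rw [hev, hSlen]; omega)
    simp only [Int.toNat_zero] at heq1 hs1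
    obtain ⟨col2, c2, heq2, _, _⟩ :=
      foldl_stepA (PySem.List.pyRange 1 (n:Int) 2) col1 c1
        (writes (List.replicate n "") (PySem.List.pyRange 0 (n:Int) 2) (streamFrom [f, s, t] 0))
        hinv1 (by rw [hs1, List.length_drop, hSlen, hev, hodlen]; omega)
    rw [heq1, heq2, hs1,
      ← writes_append _ _ _ _ (by rw [hSlen, hev]; omega), foldl_push]
    refine congrArg (PySem.Str.join "") ?_
    apply List.ext_getElem?
    intro i
    by_cases hi : i < n
    · have hlhs_len : (writes (List.replicate n "")
          (PySem.List.pyRange 0 (n:Int) 2 ++ PySem.List.pyRange 1 (n:Int) 2)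
          (streamFrom [f, s, t] 0)).length = n := by
        rw [length_writes, List.length_replicate]
      set rk := if i % 2 = 0 then i / 2 else (n + 1) / 2 + i / 2 with hrk
      have hrkn : rk < n := by rw [hrk]; split_ifs <;> omega
      have hposr : (PySem.List.pyRange 0 (n:Int) 2 ++ PySem.List.pyRange 1 (n:Int) 2)[rk]?
          = some (i : Int) := by
        by_cases hpar : i % 2 = 0
        · rw [List.getElem?_append_left (by rw [hev, hrk]; simp [hpar]; omega),
            pyRange_two_getElem? _ _ _ hNpos]
          rw [hrk]; simp only [hpar, if_true]
          rw [if_pos (by omega)]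
          congr 1
          push_cast
          omega
        · rw [List.getElem?_append_right (by rw [hev, hrk]; simp [hpar]),
            hev, pyRange_two_getElem? _ _ _ (by omega : (1:Int) < (n:Int))]
          rw [hrk]; simp only [hpar, if_false]
          rw [if_pos (by omega)]
          congr 1
          omega
      have hlater : ∀ r' v', rk < r' →
          (PySem.List.pyRange 0 (n:Int) 2 ++ PySem.List.pyRange 1 (n:Int) 2)[r']? = some v' →
          v'.toNat ≠ i := by
        intro r' v' hlt hget
        by_cases hsplit : r' < (n + 1) / 2
        · rw [List.getElem?_append_left (by rw [hev]; omega),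
            pyRange_two_getElem? _ _ _ hNpos, if_pos (by omega)] at hget
          have hv' : v' = 2 * r' := by
            have := hget; injection this with h; omega
          rw [hrk] at hlt; split_ifs at hlt <;> omega
        · by_cases hr' : r' < (n + 1) / 2 + n / 2
          · rw [List.getElem?_append_right (by rw [hev]; omega), hev,
              pyRange_two_getElem? _ _ _ (by omega : (1:Int) < (n:Int)),
              if_pos (by omega)] at hget
            have hv' : v' = 1 + 2 * (r' - (n + 1) / 2) := by
              have := hget; injection this with h; omega
            rw [hrk] at hlt; split_ifs at hlt <;> omega
          · rw [List.getElem?_eq_none (by simp [hev, hodlen]; omega)] at hget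
            cases hget
      rw [writes_getElem? _ _ _ rk i (i : Int) hposr (by simp) (by simpa) 
          (by rw [hSlen]; omega) hlater,
        stream3_getElem? f s t rk (by omega)]
      simp only [List.nil_append, List.getElem?_map, PySem.List.getElem?_pyRange_one]
      rw [if_pos (show i < ((n:Int) - 0).toNat by simpa using hi)]
      simp only [Option.map_some]
      have hmod : PySem.Int.mod ((0:Int) + (i:Int)) 2 = ((i % 2 : Nat) : Int) := by
        rw [zero_add]; exact_mod_cast PySem.Int.mod_natCast i 2
      have hdiv : PySem.Int.floordiv ((0:Int) + (i:Int)) 2 = ((i / 2 : Nat) : Int) := by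
        rw [zero_add]; exact_mod_cast PySem.Int.floordiv_natCast i 2
      have hhalf : PySem.Int.floordiv ((n:Int) + 1) 2 = (((n + 1) / 2 : Nat) : Int) := by
        rw [show ((n:Int) + 1) = ((n + 1 : Nat) : Int) by push_cast; ring]
        exact_mod_cast PySem.Int.floordiv_natCast (n + 1) 2
      have hm1 : max f.1 0 = (f.1.toNat : Int) := by omega
      have hm2 : (f.1.toNat : Int) + max s.1 0 = ((f.1.toNat + s.1.toNat : Nat) : Int) := by
        omega
      simp only [hmod, hdiv, hhalf, hm1, hm2]
      rw [hrk]
      by_cases hpar : i % 2 = 0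
      · have hc : ((((i % 2 : Nat)) : Int) == 0) = true := by rw [hpar]; rfl
        rw [if_pos hpar, hc]
        simp only [if_true]
        by_cases hlt1 : i / 2 < f.1.toNat
        · rw [if_pos hlt1, if_pos (show ((i / 2 : Nat) : Int) < (f.1.toNat : Int) by
            exact_mod_cast hlt1)]
        · rw [if_neg hlt1, if_neg (show ¬ ((i / 2 : Nat) : Int) < (f.1.toNat : Int) by
            exact_mod_cast hlt1)]
          by_cases hlt2 : i / 2 < f.1.toNat + s.1.toNat
          · rw [if_pos hlt2, if_pos (show ((i / 2 : Nat) : Int)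
                < ((f.1.toNat + s.1.toNat : Nat) : Int) by exact_mod_cast hlt2)]
          · rw [if_neg hlt2, if_neg (show ¬ ((i / 2 : Nat) : Int)
                < ((f.1.toNat + s.1.toNat : Nat) : Int) by exact_mod_cast hlt2)]
      · have h1 : i % 2 = 1 := by omega
        have hc : ((((i % 2 : Nat)) : Int) == 0) = false := by rw [h1]; rfl
        rw [if_neg hpar, hc]
        simp only [Bool.false_eq_true, if_false]
        rw [show (((n + 1) / 2 : Nat) : Int) + ((i / 2 : Nat) : Int)
            = (((n + 1) / 2 + i / 2 : Nat) : Int) from (Nat.cast_add _ _).symm]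
        by_cases hlt1 : (n + 1) / 2 + i / 2 < f.1.toNat
        · rw [if_pos hlt1, if_pos (show (((n + 1) / 2 + i / 2 : Nat) : Int)
              < (f.1.toNat : Int) by exact_mod_cast hlt1)]
        · rw [if_neg hlt1, if_neg (show ¬ (((n + 1) / 2 + i / 2 : Nat) : Int)
              < (f.1.toNat : Int) by exact_mod_cast hlt1)]
          by_cases hlt2 : (n + 1) / 2 + i / 2 < f.1.toNat + s.1.toNat
          · rw [if_pos hlt2, if_pos (show (((n + 1) / 2 + i / 2 : Nat) : Int)
                < ((f.1.toNat + s.1.toNat : Nat) : Int) by exact_mod_cast hlt2)]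
          · rw [if_neg hlt2, if_neg (show ¬ (((n + 1) / 2 + i / 2 : Nat) : Int)
                < ((f.1.toNat + s.1.toNat : Nat) : Int) by exact_mod_cast hlt2)]
    · rw [List.getElem?_eq_none, List.getElem?_eq_none]
      · simp only [List.nil_append, List.length_map, PySem.List.length_pyRange_one]
        omega
      · rw [length_writes, List.length_replicate]; omega
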